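-- pv_equiv track=rewrite | github.com/RenukaPulavarthi/leetcode | 3723-maximize-sum-of-squares-of-digits/3723-maximize-sum-of-squares-of-digits.py | maxSumOfSquares
-- ===== SOURCE A (Python) =====
-- def maxSumOfSquares(num: int, su: int) -> str:
--     ans = ''
--     for i in range(num):
--         if su >= 9:
--             ans += '9'
--             su -= 9
--         else:
--             ans += str(su)
--             su = 0
--     if su != 0:
--         return ''
--     return ans
-- ===== SOURCE B (Python) =====
-- def maxSumOfSquares(num: int, su: int) -> str:
--     # Closed-form construction: digit counts from divmod instead of a per-position loop.
--     if num <= 0: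
--         return ''
--     if su < 9:
--         return str(su) + '0' * (num - 1)
--     q, r = divmod(su, 9)
--     if q >= num:
--         return '9' * num if su == 9 * num else ''
--     return '9' * q + str(r) + '0' * (num - q - 1)
-- ===== Notes on version B (the rewrite author's own statement) =====
-- stated objective: simpler
-- what changed: Replaces the position-by-position greedy loop with a closed-form construction: compute q, r = divmod(su, 9) and materialize '9'*q + str(r) + zero padding in one shot.
import Mathlib
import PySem

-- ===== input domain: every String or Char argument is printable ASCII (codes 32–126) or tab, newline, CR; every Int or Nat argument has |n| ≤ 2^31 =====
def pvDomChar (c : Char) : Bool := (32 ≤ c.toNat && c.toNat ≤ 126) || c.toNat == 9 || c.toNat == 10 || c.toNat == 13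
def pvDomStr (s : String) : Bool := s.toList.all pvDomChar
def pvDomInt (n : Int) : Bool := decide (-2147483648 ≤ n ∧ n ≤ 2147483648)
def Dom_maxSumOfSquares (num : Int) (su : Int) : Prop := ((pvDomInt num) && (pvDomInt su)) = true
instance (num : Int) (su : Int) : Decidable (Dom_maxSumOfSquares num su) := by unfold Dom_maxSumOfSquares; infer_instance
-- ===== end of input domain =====

-- B replaces A's per-position greedy loop with a closed-form divmod construction; objective: simpler.

-- ===== PORT A =====
-- strings are handled as List Char (PySem convention); '+=' on ans is list append
def maxSumOfSquares (num : Int) (su : Int) : String :=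
  let st := (PySem.List.pyRange 0 num 1).foldl
    (fun (st : List Char × Int) _ =>
      if st.2 ≥ 9 then (st.1 ++ ['9'], st.2 - 9)
      else (st.1 ++ PySem.Int.toChars st.2, 0))
    ([], su)
  if st.2 ≠ 0 then "" else String.mk st.1

-- ===== PORT B =====
def maxSumOfSquares_alt (num : Int) (su : Int) : String :=
  if num ≤ 0 then ""
  else if su < 9 then String.mk (PySem.Int.toChars su ++ List.replicate (num - 1).toNat '0')
  else
    let q := PySem.Int.floordiv su 9
    let r := PySem.Int.mod su 9
    if num ≤ q then
      (if su = 9 * num then String.mk (List.replicate num.toNat '9') else "")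
    else String.mk (List.replicate q.toNat '9' ++ PySem.Int.toChars r ++ List.replicate (num - q - 1).toNat '0')

-- ===== PRECONDITION & SPEC =====
def Spec_maxSumOfSquares (num : Int) (su : Int) (out : String) : Prop := out = maxSumOfSquares_alt num su
instance (num : Int) (su : Int) (out : String) : Decidable (Spec_maxSumOfSquares num su out) := by unfold Spec_maxSumOfSquares; infer_instance

-- ===== CLAIM (what is proved, stated in full; the proofs are below) =====
def Claim_equal_maxSumOfSquares : Prop := ∀ (num : Int) (su : Int), Dom_maxSumOfSquares num su → Spec_maxSumOfSquares num su (maxSumOfSquares num su)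

-- ===== LEMMAS AND PROOFS =====

-- A's loop, abstracted to its trip count (the loop body ignores the loop variable)
def loopA : Nat → Int → List Char × Int
  | 0, su => ([], su)
  | n + 1, su =>
    if su ≥ 9 then
      let p := loopA n (su - 9); ('9' :: p.1, p.2)
    else
      let p := loopA n 0; (PySem.Int.toChars su ++ p.1, p.2)

theorem foldl_eq_loopA (l : List Int) (a : List Char) (s : Int) :
    l.foldl (fun (st : List Char × Int) _ =>
      if st.2 ≥ 9 then (st.1 ++ ['9'], st.2 - 9)
      else (st.1 ++ PySem.Int.toChars st.2, 0)) (a, s)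
    = (a ++ (loopA l.length s).1, (loopA l.length s).2) := by
  induction l generalizing a s with
  | nil => simp [loopA]
  | cons x xs ih =>
    simp only [List.foldl_cons, List.length_cons, loopA]
    by_cases h : s ≥ 9 <;> simp [h, ih, List.append_assoc]

theorem loopA_zero (n : Nat) : loopA n 0 = (List.replicate n '0', 0) := by
  induction n with
  | zero => simp [loopA]
  | succ n ih =>
    have h9 : ¬ ((0:Int) ≥ 9) := by norm_num
    have ht : PySem.Int.toChars 0 = ['0'] := by decide
    simp [loopA, h9, ih, ht, List.replicate_succ]

theorem loopA_lt9 (n : Nat) (su : Int) (h : su < 9) :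
    loopA (n + 1) su = (PySem.Int.toChars su ++ List.replicate n '0', 0) := by
  have h9 : ¬ (su ≥ 9) := by omega
  simp [loopA, h9, loopA_zero]

theorem loopA_nines (n : Nat) : ∀ su : Int, 9 * (n : Int) ≤ su →
    loopA n su = (List.replicate n '9', su - 9 * n) := by
  induction n with
  | zero => intro su _; simp [loopA]
  | succ n ih =>
    intro su h
    have h9 : su ≥ 9 := by push_cast at h; omega
    have hb : 9 * (n : Int) ≤ su - 9 := by push_cast at h ⊢; omega
    have harith : su - 9 - 9 * (n : Int) = su - 9 * ((n : Int) + 1) := by ring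
    simp [loopA, h9, ih _ hb, List.replicate_succ, harith]

theorem loopA_mid (q : Nat) : ∀ (n : Nat) (su : Int), 9 * (q : Int) ≤ su → su < 9 * (q : Int) + 9 →
    q < n →
    loopA n su = (List.replicate q '9' ++ PySem.Int.toChars (su - 9 * q) ++
      List.replicate (n - q - 1) '0', 0) := by
  induction q with
  | zero =>
    intro n su _ h2 hn
    obtain ⟨m, rfl⟩ : ∃ m, n = m + 1 := ⟨n - 1, by omega⟩
    have := loopA_lt9 m su (by push_cast at h2; omega)
    simp [this]
  | succ q ih =>
    intro n su h1 h2 hn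
    obtain ⟨m, rfl⟩ : ∃ m, n = m + 1 := ⟨n - 1, by omega⟩
    have h9 : su ≥ 9 := by push_cast at h1; omega
    have hb1 : 9 * (q : Int) ≤ su - 9 := by push_cast at h1; omega
    have hb2 : su - 9 < 9 * (q : Int) + 9 := by push_cast at h2; omega
    have harith : su - 9 - 9 * (q : Int) = su - 9 * ((q : Int) + 1) := by ring
    have hm : m + 1 - (q + 1) - 1 = m - q - 1 := by omega
    simp [loopA, h9, ih m (su - 9) hb1 hb2 (by omega), List.replicate_succ, harith]

theorem maxSumOfSquares_eq_alt (num su : Int) :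
    maxSumOfSquares num su = maxSumOfSquares_alt num su := by
  unfold maxSumOfSquares maxSumOfSquares_alt
  rw [foldl_eq_loopA]
  simp only [PySem.List.length_pyRange_one, List.nil_append]
  by_cases hnum : num ≤ 0
  · rw [if_pos hnum]
    have h0 : (num - 0).toNat = 0 := by omega
    rw [h0]
    by_cases hz : su = 0
    · subst hz
      rw [if_neg (by simp [loopA])]
      simp [loopA]
      rfl
    · rw [if_pos (by simpa [loopA] using hz)]
  · push_neg at hnum
    rw [if_neg (by omega : ¬ num ≤ 0)]
    have hnt : (num - 0).toNat = num.toNat := by omega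
    rw [hnt]
    by_cases hsu : su < 9
    · rw [if_pos hsu]
      have hm : num.toNat = (num - 1).toNat + 1 := by omega
      rw [hm, loopA_lt9 _ _ hsu]
      rw [if_neg (by simp)]
    · push_neg at hsu
      rw [if_neg (by omega : ¬ su < 9)]
      -- floor division facts for the positive divisor 9
      have hfd : PySem.Int.floordiv su 9 = su / 9 := PySem.Int.floordiv_eq_ediv_of_pos (by norm_num)
      have hmd : PySem.Int.mod su 9 = su % 9 := PySem.Int.mod_eq_emod_of_pos (by norm_num)
      have hdm : 9 * (su / 9) + su % 9 = su := Int.ediv_add_emod su 9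
      have hr0 : 0 ≤ su % 9 := Int.emod_nonneg su (by norm_num)
      have hr9 : su % 9 < 9 := Int.emod_lt_of_pos su (by norm_num)
      set q := su / 9 with hq
      have hq1 : 1 ≤ q := by omega
      rw [hfd, hmd]
      by_cases hqn : num ≤ q
      · -- su ≥ 9 * num : A writes num nines, leftover su - 9 * num
        rw [if_pos hqn]
        have hcast : (num.toNat : Int) = num := by omega
        rw [loopA_nines num.toNat su (by rw [hcast]; omega)]
        by_cases hz : su = 9 * num
        · rw [if_pos hz]
          rw [if_neg (by simp [hcast]; omega)]
        · rw [if_neg hz]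
          rw [if_pos (by simp [hcast]; omega)]
      · rw [if_neg hqn]
        push_neg at hqn
        have hc1 : (q.toNat : Int) = q := by omega
        have hlt : q.toNat < num.toNat := by omega
        rw [loopA_mid q.toNat num.toNat su (by rw [hc1]; omega) (by rw [hc1]; omega) hlt]
        rw [if_neg (by simp)]
        congr 1
        have hr : su - 9 * (q.toNat : Int) = su % 9 := by rw [hc1]; omega
        have hnn : num.toNat - q.toNat - 1 = (num - q - 1).toNat := by omega
        rw [hr, hnn, List.append_assoc]

-- ===== VERDICT (by name: the statement is the Claim_ definition above) =====
theorem maxSumOfSquares_spec : Claim_equal_maxSumOfSquares := by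
  intro num su _
  exact maxSumOfSquares_eq_alt num su
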